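-- pv_equiv track=rewrite | github.com/eliottcassidy2000/math | 04-computation/h21_mm2_safe_deletion.py | max_3cycle_matching
-- ===== SOURCE A (Python) =====
-- def max_3cycle_matching(cycles):
--     """Find max matching of 3-cycles (vertex-disjoint).
--     Uses greedy + backtracking for small instances.
--     Returns (size, list of disjoint cycles).
--     """
--     if not cycles:
--         return 0, []
--
--     cycle_list = list(cycles)
--     best = [0, []]
--
--     def backtrack(idx, used_verts, current_match):
--         if len(current_match) > best[0]:
--             best[0] = len(current_match)
--             best[1] = list(current_match)
--         if best[0] >= 3:  # Early termination: we only care about <=2 vs >=3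
--             return
--         if idx >= len(cycle_list):
--             return
--         # Prune: remaining cycles can't improve
--         if len(current_match) + (len(cycle_list) - idx) <= best[0]:
--             return
--
--         for i in range(idx, len(cycle_list)):
--             c = cycle_list[i]
--             if not (c & used_verts):
--                 current_match.append(c)
--                 backtrack(i + 1, used_verts | c, current_match)
--                 current_match.pop()
--                 if best[0] >= 3:
--                     return
--
--     backtrack(0, frozenset(), [])
--     return best[0], best[1]
-- ===== SOURCE B (Python) =====
-- def max_3cycle_matching(cycles):
--     """Find max matching of 3-cycles (vertex-disjoint).
--     Staged scans: first pairwise-disjoint triple, else first disjoint pair,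
--     else a single cycle.  Returns (size, list of disjoint cycles).
--     """
--     cl = list(cycles)
--     # stage 1: lexicographically-first pairwise-disjoint triple i < j < k
--     for i, ci in enumerate(cl):
--         for j in range(i + 1, len(cl)):
--             cj = cl[j]
--             if not (ci & cj):
--                 for ck in cl[j + 1:]:
--                     if not (ci & ck) and not (cj & ck):
--                         return 3, [ci, cj, ck]
--     # stage 2: lexicographically-first disjoint pair i < j
--     for i, ci in enumerate(cl):
--         for cj in cl[i + 1:]:
--             if not (ci & cj):
--                 return 2, [ci, cj]
--     if cl:
--         return 1, [cl[0]]
--     return 0, []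
-- ===== Notes on version B (the rewrite author's own statement) =====
-- stated objective: simpler
-- what changed: Replaced the recursive backtracking with mutable best/current state by three flat staged scans (first pairwise-disjoint index triple, else first disjoint pair, else first cycle), each returning directly.
import Mathlib
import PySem

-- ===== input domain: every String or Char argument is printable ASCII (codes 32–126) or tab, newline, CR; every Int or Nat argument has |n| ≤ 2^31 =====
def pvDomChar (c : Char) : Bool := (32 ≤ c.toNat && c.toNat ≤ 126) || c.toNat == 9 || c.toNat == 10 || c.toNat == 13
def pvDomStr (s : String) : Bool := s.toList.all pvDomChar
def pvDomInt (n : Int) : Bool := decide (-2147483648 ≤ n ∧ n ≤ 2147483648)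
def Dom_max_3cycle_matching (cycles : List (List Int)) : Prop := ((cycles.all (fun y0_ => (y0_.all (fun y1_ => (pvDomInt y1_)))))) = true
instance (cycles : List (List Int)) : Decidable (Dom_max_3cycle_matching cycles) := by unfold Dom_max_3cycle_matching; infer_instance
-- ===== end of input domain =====

-- ===== PORT A =====
-- B replaces A's recursive backtracking by three flat staged scans (triple, pair, single); same results, simpler.
-- Port of Python's `not (a & b)` on sets: the two lists share no element.
def disjSet (a b : List Int) : Bool := a.all (fun v => !b.contains v)

mutual
-- `backtrack` of A: best/current_match threaded as values instead of mutated in place.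
def btA (cl : List (List Int)) (idx : Nat) (used : List Int) (cur : List (List Int))
    (best : Int × List (List Int)) : Int × List (List Int) :=
  let best := if (cur.length : Int) > best.1 then ((cur.length : Int), cur) else best
  if best.1 ≥ 3 then best
  else if idx ≥ cl.length then best
  else if (cur.length : Int) + ((cl.length : Int) - (idx : Int)) ≤ best.1 then best
  else loopA cl idx used cur best
  termination_by (cl.length - idx, 1)
  decreasing_by exact Prod.Lex.right _ Nat.zero_lt_one
-- the `for i in range(idx, len(cycle_list))` loop of `backtrack`
def loopA (cl : List (List Int)) (i : Nat) (used : List Int) (cur : List (List Int))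
    (best : Int × List (List Int)) : Int × List (List Int) :=
  if h : i < cl.length then
    let c := cl[i]
    if disjSet c used then
      let best' := btA cl (i + 1) (used ++ c) (cur ++ [c]) best
      if best'.1 ≥ 3 then best' else loopA cl (i + 1) used cur best'
    else loopA cl (i + 1) used cur best
  else best
  termination_by (cl.length - i, 0)
  decreasing_by all_goals exact Prod.Lex.left _ _ (Nat.sub_succ_lt_self _ _ h)
end

def max_3cycle_matching (cycles : List (List Int)) : Int × List (List Int) :=
  if cycles.isEmpty then (0, [])
  else btA cycles 0 [] [] (0, [])

-- ===== PORT B =====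
-- the `for ck in cl[j+1:]` loop of stage 1
def scanK (ci cj : List Int) : List (List Int) → Option (List Int)
  | [] => none
  | ck :: rs => if disjSet ci ck && disjSet cj ck then some ck else scanK ci cj rs

-- the `for j in range(i+1, len(cl))` loop of stage 1
def scanJ (ci : List Int) : List (List Int) → Option (List Int × List Int)
  | [] => none
  | cj :: rs =>
    if disjSet ci cj then
      match scanK ci cj rs with
      | some ck => some (cj, ck)
      | none => scanJ ci rs
    else scanJ ci rs

-- stage 1: lexicographically-first pairwise-disjoint triple
def scanT : List (List Int) → Option (List Int × List Int × List Int)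
  | [] => none
  | ci :: rs =>
    match scanJ ci rs with
    | some (cj, ck) => some (ci, cj, ck)
    | none => scanT rs

-- the `for cj in cl[i+1:]` loop of stage 2
def scanK2 (ci : List Int) : List (List Int) → Option (List Int)
  | [] => none
  | cj :: rs => if disjSet ci cj then some cj else scanK2 ci rs

-- stage 2: lexicographically-first disjoint pair
def scanP : List (List Int) → Option (List Int × List Int)
  | [] => none
  | ci :: rs =>
    match scanK2 ci rs with
    | some cj => some (ci, cj)
    | none => scanP rs

def max_3cycle_matching_alt (cycles : List (List Int)) : Int × List (List Int) :=
  match scanT cycles with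
  | some (ci, cj, ck) => (3, [ci, cj, ck])
  | none =>
    match scanP cycles with
    | some (ci, cj) => (2, [ci, cj])
    | none =>
      match cycles with
      | c0 :: _ => (1, [c0])
      | [] => (0, [])

-- ===== PRECONDITION & SPEC =====
def Spec_max_3cycle_matching (cycles : List (List Int)) (out : Int × List (List Int)) : Prop := out = max_3cycle_matching_alt cycles
instance (cycles : List (List Int)) (out : Int × List (List Int)) : Decidable (Spec_max_3cycle_matching cycles out) := by unfold Spec_max_3cycle_matching; infer_instance

-- ===== CLAIM (what is proved, stated in full; the proofs are below) =====
def Claim_equal_max_3cycle_matching : Prop := ∀ (cycles : List (List Int)), Dom_max_3cycle_matching cycles → Spec_max_3cycle_matching cycles (max_3cycle_matching cycles)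

-- ===== LEMMAS AND PROOFS =====

-- proof-side scans parameterized by A's accumulated `used` set
def sK (u : List Int) (l : List (List Int)) : Option (List Int) := l.find? (fun c => disjSet c u)

def sJ (u : List Int) : List (List Int) → Option (List Int × List Int)
  | [] => none
  | cj :: rs =>
    if disjSet cj u then
      match sK (u ++ cj) rs with
      | some ck => some (cj, ck)
      | none => sJ u rs
    else sJ u rs

def sT : List (List Int) → Option (List Int × List Int × List Int)
  | [] => none
  | ci :: rs =>
    match sJ ci rs with
    | some (cj, ck) => some (ci, cj, ck)
    | none => sT rs

def sP : List (List Int) → Option (List Int × List Int)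
  | [] => none
  | ci :: rs =>
    match sK ci rs with
    | some cj => some (ci, cj)
    | none => sP rs

theorem disjSet_comm (a b : List Int) : disjSet a b = disjSet b a := by
  rw [Bool.eq_iff_iff]
  simp only [disjSet, List.all_eq_true, Bool.not_eq_eq_eq_not, Bool.not_true,
    List.contains_eq_mem, decide_eq_false_iff_not]
  tauto

@[simp] theorem disjSet_nil (a : List Int) : disjSet a [] = true := by
  simp [disjSet]

theorem disjSet_append (c u v : List Int) :
    disjSet c (u ++ v) = (disjSet c u && disjSet c v) := by
  rw [Bool.eq_iff_iff]
  simp only [disjSet, List.all_eq_true, Bool.and_eq_true, Bool.not_eq_eq_eq_not, Bool.not_true,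
    List.contains_eq_mem, decide_eq_false_iff_not, List.mem_append]
  constructor
  · intro h
    exact ⟨fun x hx hu => h x hx (Or.inl hu), fun x hx hv => h x hx (Or.inr hv)⟩
  · rintro ⟨h1, h2⟩ x hx (hu | hv)
    exacts [h1 x hx hu, h2 x hx hv]

theorem sK_pair (ci cj : List Int) (l : List (List Int)) :
    sK (ci ++ cj) l = scanK ci cj l := by
  induction l with
  | nil => rfl
  | cons c rs ih =>
    have hp : disjSet c (ci ++ cj) = (disjSet ci c && disjSet cj c) := by
      rw [disjSet_append, disjSet_comm c ci, disjSet_comm c cj]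
    cases hcd : (disjSet ci c && disjSet cj c) with
    | true =>
      rw [sK, List.find?_cons_of_pos (by rw [hp, hcd])]
      simp [scanK, hcd]
    | false =>
      rw [sK, List.find?_cons_of_neg (by rw [hp, hcd]; simp)]
      simp only [scanK, hcd, Bool.false_eq_true, if_false]
      exact ih

theorem sK_single (ci : List Int) (l : List (List Int)) :
    sK ci l = scanK2 ci l := by
  induction l with
  | nil => rfl
  | cons c rs ih =>
    cases hcd : disjSet ci c with
    | true =>
      rw [sK, List.find?_cons_of_pos (by rw [disjSet_comm, hcd])]
      simp [scanK2, hcd]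
    | false =>
      rw [sK, List.find?_cons_of_neg (by rw [disjSet_comm, hcd]; simp)]
      simp only [scanK2, hcd, Bool.false_eq_true, if_false]
      exact ih

theorem sJ_single (ci : List Int) (l : List (List Int)) :
    sJ ci l = scanJ ci l := by
  induction l with
  | nil => rfl
  | cons cj rs ih =>
    rw [sJ, scanJ, disjSet_comm cj ci, sK_pair, ih]

theorem sT_scanT (l : List (List Int)) : sT l = scanT l := by
  induction l with
  | nil => rfl
  | cons ci rs ih => rw [sT, scanT, sJ_single, ih]

theorem sP_scanP (l : List (List Int)) : sP l = scanP l := by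
  induction l with
  | nil => rfl
  | cons ci rs ih => rw [sP, scanP, sK_single, ih]

theorem drop_cons_elim {cl l : List (List Int)} {c : List Int} {i : Nat}
    (h : cl.drop i = c :: l) : i < cl.length ∧ cl[i]? = some c ∧ cl.drop (i+1) = l := by
  have hi : i < cl.length := by
    by_contra hn
    simp [List.drop_eq_nil_of_le (Nat.le_of_not_lt hn)] at h
  refine ⟨hi, ?_, ?_⟩
  · have h0 : (List.drop i cl)[0]? = cl[i + 0]? := List.getElem?_drop
    simp [h] at h0
    exact h0.symm
  · have h2 : cl.drop (i+1) = (cl.drop i).drop 1 := by rw [List.drop_drop]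
    rw [h2, h]
    rfl

-- level 3: a third cycle has just been added
theorem btA_three (cl : List (List Int)) (idx : Nat) (u : List Int) (cur : List (List Int))
    (best : Int × List (List Int)) (hc : cur.length = 3) (hb : best.1 = 1 ∨ best.1 = 2) :
    btA cl idx u cur best = (3, cur) := by
  rw [btA]
  rcases hb with h | h <;> simp [hc, h]

theorem loopA_two (cl : List (List Int)) (u2 : List Int) (cur2 : List (List Int))
    (hc : cur2.length = 2) (p : List (List Int)) :
    ∀ (l : List (List Int)) (i : Nat), cl.drop i = l →
    loopA cl i u2 cur2 (2, p) =
      (match sK u2 l with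
       | some ck => (3, cur2 ++ [ck])
       | none => ((2 : Int), p)) := by
  intro l
  induction l with
  | nil =>
    intro i hl
    have hi : cl.length ≤ i := by
      by_contra hn
      have := List.drop_eq_nil_iff.mp hl
      omega
    rw [loopA]
    simp [Nat.not_lt.2 hi, sK]
  | cons c rs ih =>
    intro i hl
    obtain ⟨hi, hget, hdrop⟩ := drop_cons_elim hl
    have hc0 : cl[i] = c := by
      rw [List.getElem?_eq_getElem hi] at hget
      exact Option.some_injective _ hget
    rw [loopA]
    simp only [hi, dif_pos, hc0]
    cases hd : disjSet c u2 with
    | true =>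
      have h3 : btA cl (i + 1) (u2 ++ c) (cur2 ++ [c]) (2, p) = (3, cur2 ++ [c]) :=
        btA_three cl (i + 1) (u2 ++ c) (cur2 ++ [c]) (2, p) (by simp [hc]) (Or.inr rfl)
      rw [sK, List.find?_cons_of_pos (by exact hd)]
      simp [h3]
    | false =>
      rw [sK, List.find?_cons_of_neg (by simp [hd])]
      simp only [Bool.false_eq_true, if_false]
      exact ih (i + 1) hdrop

theorem btA_two (cl : List (List Int)) (u2 : List Int) (cur2 : List (List Int))
    (hc : cur2.length = 2) (best : Int × List (List Int)) (hb : best.1 = 1 ∨ best.1 = 2)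
    (l : List (List Int)) (idx : Nat) (hl : cl.drop idx = l) :
    btA cl idx u2 cur2 best =
      (match sK u2 l with
       | some ck => (3, cur2 ++ [ck])
       | none => if best.1 = 1 then ((2 : Int), cur2) else best) := by
  obtain ⟨b1, b2⟩ := best
  simp only at hb ⊢
  rw [btA]
  rcases hb with h | h <;> subst h
  · -- b1 = 1: the entry update lifts best to (2, cur2)
    by_cases hn : cl.length ≤ idx
    · have hnil : l = [] := by
        rw [← hl]
        exact List.drop_eq_nil_of_le hn
      simp [hnil, sK, hn, hc]
    · norm_num [hc]
      rw [if_neg hn, if_neg hn]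
      exact loopA_two cl u2 cur2 hc cur2 l idx hl
  · -- b1 = 2: no update
    by_cases hn : cl.length ≤ idx
    · have hnil : l = [] := by
        rw [← hl]
        exact List.drop_eq_nil_of_le hn
      simp [hnil, sK, hn, hc]
    · norm_num [hc]
      rw [if_neg hn, if_neg hn]
      exact loopA_two cl u2 cur2 hc b2 l idx hl

theorem loopA_one (cl : List (List Int)) (u : List Int) (cur : List (List Int))
    (hc : cur.length = 1) :
    ∀ (l : List (List Int)) (i : Nat) (best : Int × List (List Int)),
    cl.drop i = l → best.1 = 1 ∨ best.1 = 2 →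
    loopA cl i u cur best =
      (match sJ u l with
       | some (cj, ck) => (3, cur ++ [cj] ++ [ck])
       | none =>
         if best.1 = 1 then
           match sK u l with
           | some cj => ((2 : Int), cur ++ [cj])
           | none => best
         else best) := by
  intro l
  induction l with
  | nil =>
    intro i best hl hb
    have hi : cl.length ≤ i := by
      by_contra hn
      have := List.drop_eq_nil_iff.mp hl
      omega
    rw [loopA]
    rcases hb with h | h <;> simp [Nat.not_lt.2 hi, sJ, sK, h]
  | cons c rs ih =>
    intro i best hl hb
    obtain ⟨hi, hget, hdrop⟩ := drop_cons_elim hl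
    have hc0 : cl[i] = c := by
      rw [List.getElem?_eq_getElem hi] at hget
      exact Option.some_injective _ hget
    rw [loopA]
    simp only [hi, dif_pos, hc0]
    cases hd : disjSet c u with
    | false =>
      rw [sJ]
      simp only [hd, Bool.false_eq_true, if_false]
      rw [sK, List.find?_cons_of_neg (by simp [hd])]
      exact ih (i + 1) best hdrop hb
    | true =>
      rw [btA_two cl (u ++ c) (cur ++ [c]) (by simp [hc]) best hb rs (i + 1) hdrop]
      rw [sJ]
      simp only [hd, if_true]
      cases hsk : sK (u ++ c) rs with
      | some ck => simp
      | none =>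
        have hskc : sK u (c :: rs) = some c := by
          rw [sK, List.find?_cons_of_pos (by exact hd)]
        rcases hb with h | h
        · rw [if_pos h]
          rw [if_neg (by norm_num : ¬ (((2 : Int), cur ++ [c]).1 ≥ 3))]
          rw [ih (i + 1) ((2 : Int), cur ++ [c]) hdrop (Or.inr rfl)]
          rw [hskc]
          cases hsj : sJ u rs with
          | some p => cases p with | mk cj ck => simp
          | none => simp [h]
        · simp only [h]
          norm_num
          rw [if_neg (show ¬ (3 : Int) ≤ best.1 by omega)]
          rw [ih (i + 1) best hdrop (Or.inr h)]
          cases hsj : sJ u rs with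
          | some p => cases p with | mk cj ck => simp
          | none => simp [h]

theorem btA_one (cl : List (List Int)) (u : List Int) (cur : List (List Int))
    (hc : cur.length = 1) (best : Int × List (List Int))
    (hb : best.1 = 0 ∨ best.1 = 1 ∨ best.1 = 2)
    (l : List (List Int)) (idx : Nat) (hl : cl.drop idx = l) :
    btA cl idx u cur best =
      (let b1 := if best.1 < 1 then ((1 : Int), cur) else best
       match sJ u l with
       | some (cj, ck) => (3, cur ++ [cj] ++ [ck])
       | none =>
         if b1.1 = 1 then
           match sK u l with
           | some cj => ((2 : Int), cur ++ [cj])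
           | none => b1
         else b1) := by
  have hsj1 : ∀ (c : List Int), sJ u [c] = none := by
    intro c
    rw [sJ]
    split <;> rfl
  obtain ⟨b1, b2⟩ := best
  simp only at hb ⊢
  rw [btA]
  rcases hb with h | h | h <;> subst h
  · -- b1 = 0: the entry update lifts best to (1, cur)
    by_cases hn : cl.length ≤ idx
    · have hnil : l = [] := by
        rw [← hl]
        exact List.drop_eq_nil_of_le hn
      simp [hnil, sJ, sK, hn, hc]
    · norm_num [hc]
      rw [if_neg hn, if_neg hn]
      rw [loopA_one cl u cur hc l idx ((1 : Int), cur) hl (Or.inl rfl)]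
      simp
  · -- b1 = 1: no update
    by_cases hn : cl.length ≤ idx
    · have hnil : l = [] := by
        rw [← hl]
        exact List.drop_eq_nil_of_le hn
      simp [hnil, sJ, sK, hn, hc]
    · norm_num [hc]
      rw [if_neg hn, if_neg hn]
      rw [loopA_one cl u cur hc l idx ((1 : Int), b2) hl (Or.inl rfl)]
      simp
  · -- b1 = 2: possible prune when at most one cycle remains
    by_cases hn : cl.length ≤ idx
    · have hnil : l = [] := by
        rw [← hl]
        exact List.drop_eq_nil_of_le hn
      simp [hnil, sJ, hn, hc]
    · by_cases hp : cl.length ≤ idx + 1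
      · have hone : l.length = 1 := by
          rw [← hl, List.length_drop]
          omega
        obtain ⟨c, hc1⟩ : ∃ c, l = [c] := by
          cases l with
          | nil => simp at hone
          | cons a t =>
            cases t with
            | nil => exact ⟨a, rfl⟩
            | cons b t2 => simp at hone
        norm_num [hc]
        rw [if_neg hn, if_pos (show (1 : Int) + ((cl.length : Int) - (idx : Nat)) ≤ 2 by omega)]
        simp [hc1, hsj1]
      · norm_num [hc]
        rw [if_neg hn, if_neg (show ¬ ((1 : Int) + ((cl.length : Int) - (idx : Nat)) ≤ 2) by omega)]
        rw [loopA_one cl u cur hc l idx ((2 : Int), b2) hl (Or.inr rfl)]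
        simp

theorem loopA_top (cl : List (List Int)) :
    ∀ (l : List (List Int)) (i : Nat) (best : Int × List (List Int)),
    cl.drop i = l → best.1 = 1 ∨ best.1 = 2 →
    loopA cl i [] [] best =
      (match sT l with
       | some (ci, cj, ck) => (3, [ci, cj, ck])
       | none =>
         if best.1 = 1 then
           match sP l with
           | some (ci, cj) => ((2 : Int), [ci, cj])
           | none => best
         else best) := by
  intro l
  induction l with
  | nil =>
    intro i best hl hb
    have hi : cl.length ≤ i := by
      by_contra hn
      have := List.drop_eq_nil_iff.mp hl
      omega
    rw [loopA]
    rcases hb with h | h <;> simp [Nat.not_lt.2 hi, sT, sP, h]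
  | cons c rs ih =>
    intro i best hl hb
    obtain ⟨hi, hget, hdrop⟩ := drop_cons_elim hl
    have hc0 : cl[i] = c := by
      rw [List.getElem?_eq_getElem hi] at hget
      exact Option.some_injective _ hget
    rw [loopA]
    simp only [hi, dif_pos, hc0, disjSet_nil, if_true, List.nil_append]
    have hstc : sT (c :: rs) =
        (match sJ c rs with
         | some (cj, ck) => some (c, cj, ck)
         | none => sT rs) := by rw [sT]
    have hspc : sP (c :: rs) =
        (match sK c rs with
         | some cj => some (c, cj)
         | none => sP rs) := by rw [sP]
    rcases hb with h | h
    · cases hsj : sJ c rs with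
      | some p =>
        obtain ⟨cj, ck⟩ := p
        have hbt : btA cl (i + 1) c [c] best = ((3 : Int), [c, cj, ck]) := by
          rw [btA_one cl c [c] rfl best (by tauto) rs (i + 1) hdrop]
          simp [hsj]
        rw [hbt, if_pos (by norm_num : ((3 : Int), [c, cj, ck]).1 ≥ 3)]
        rw [hstc]
        simp [hsj]
      | none =>
        cases hskr : sK c rs with
        | some cj =>
          have hbt : btA cl (i + 1) c [c] best = ((2 : Int), [c, cj]) := by
            rw [btA_one cl c [c] rfl best (by tauto) rs (i + 1) hdrop]
            simp [hsj, hskr, h]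
          rw [hbt, if_neg (by norm_num : ¬ (((2 : Int), [c, cj]).1 ≥ 3))]
          rw [ih (i + 1) ((2 : Int), [c, cj]) hdrop (Or.inr rfl)]
          rw [hstc, hspc, hsj, hskr]
          cases hst : sT rs with
          | some t => obtain ⟨a1, b1, c1⟩ := t; simp
          | none => simp [h]
        | none =>
          have hbt : btA cl (i + 1) c [c] best = best := by
            rw [btA_one cl c [c] rfl best (by tauto) rs (i + 1) hdrop]
            simp [hsj, hskr, h]
          rw [hbt, if_neg (by rw [h]; norm_num : ¬ (best.1 ≥ 3))]
          rw [ih (i + 1) best hdrop (Or.inl h)]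
          rw [hstc, hspc, hsj, hskr]
    · cases hsj : sJ c rs with
      | some p =>
        obtain ⟨cj, ck⟩ := p
        have hbt : btA cl (i + 1) c [c] best = ((3 : Int), [c, cj, ck]) := by
          rw [btA_one cl c [c] rfl best (by tauto) rs (i + 1) hdrop]
          simp [hsj]
        rw [hbt, if_pos (by norm_num : ((3 : Int), [c, cj, ck]).1 ≥ 3)]
        rw [hstc]
        simp [hsj]
      | none =>
        have hbt : btA cl (i + 1) c [c] best = best := by
          rw [btA_one cl c [c] rfl best (by tauto) rs (i + 1) hdrop]
          simp [hsj, h]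
        rw [hbt, if_neg (by rw [h]; norm_num : ¬ (best.1 ≥ 3))]
        rw [ih (i + 1) best hdrop (Or.inr h)]
        rw [hstc, hsj]
        cases hst : sT rs with
        | some t => obtain ⟨a1, b1, c1⟩ := t; simp
        | none => simp [h]

-- ===== VERDICT (by name: the statement is the Claim_ definition above) =====
theorem max_3cycle_matching_spec : Claim_equal_max_3cycle_matching := by
  intro cycles _
  unfold Spec_max_3cycle_matching
  cases cycles with
  | nil => rfl
  | cons c0 rest =>
    have hdrop1 : (c0 :: rest).drop 1 = rest := rfl
    rw [max_3cycle_matching]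
    rw [if_neg (by simp)]
    rw [btA]
    norm_num
    rw [if_neg (show ¬ ((rest.length : Int) < 0) by omega)]
    rw [loopA]
    simp only [List.length_cons, Nat.zero_lt_succ, dif_pos, List.getElem_cons_zero,
      disjSet_nil, if_true, List.nil_append]
    have hbt := btA_one (c0 :: rest) c0 [c0] rfl ((0 : Int), ([] : List (List Int)))
      (Or.inl rfl) rest 1 hdrop1
    cases hsj : sJ c0 rest with
    | some p =>
      obtain ⟨cj, ck⟩ := p
      rw [hsj] at hbt
      simp only at hbt
      rw [hbt, if_pos (by norm_num : ((3 : Int), [c0] ++ [cj] ++ [ck]).1 ≥ 3)]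
      have hsjB : scanJ c0 rest = some (cj, ck) := by rw [← sJ_single]; exact hsj
      rw [max_3cycle_matching_alt, scanT, hsjB]
      simp
    | none =>
      have hsjB : scanJ c0 rest = none := by rw [← sJ_single]; exact hsj
      rw [hsj] at hbt
      simp only at hbt
      cases hskr : sK c0 rest with
      | some cj =>
        rw [hskr] at hbt
        norm_num at hbt
        rw [hbt, if_neg (by norm_num : ¬ (((2 : Int), [c0, cj]).1 ≥ 3))]
        rw [loopA_top (c0 :: rest) rest 1 ((2 : Int), [c0, cj]) hdrop1 (Or.inr rfl)]
        have hskB : scanK2 c0 rest = some cj := by rw [← sK_single]; exact hskr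
        rw [max_3cycle_matching_alt, scanT, hsjB]
        simp only [← sT_scanT]
        cases hst : sT rest with
        | some t => obtain ⟨a1, b1, c1⟩ := t; simp
        | none =>
          rw [scanP, hskB]
          simp
      | none =>
        rw [hskr] at hbt
        norm_num at hbt
        rw [hbt, if_neg (by norm_num : ¬ (((1 : Int), [c0]).1 ≥ 3))]
        rw [loopA_top (c0 :: rest) rest 1 ((1 : Int), [c0]) hdrop1 (Or.inl rfl)]
        have hskB : scanK2 c0 rest = none := by rw [← sK_single]; exact hskr
        rw [max_3cycle_matching_alt, scanT, hsjB]
        simp only [← sT_scanT]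
        cases hst : sT rest with
        | some t => obtain ⟨a1, b1, c1⟩ := t; simp
        | none =>
          rw [scanP, hskB]
          simp only [← sP_scanP]
          cases hsp : sP rest with
          | some q => obtain ⟨a1, b1⟩ := q; simp
          | none => simp
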